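-- pv_equiv track=rewrite | github.com/omarVECO/music-transformer | src/data/03_midi_to_tokens.py | quantize_tempo
-- ===== SOURCE A (Python) =====
-- def quantize_tempo(bpm):
--     thresholds = [70, 90, 110, 130, 150, 170, 190]
--     labels     = ["<TEMPO_60>","<TEMPO_80>","<TEMPO_100>","<TEMPO_120>",
--                   "<TEMPO_140>","<TEMPO_160>","<TEMPO_180>","<TEMPO_200>"]
--     for t, label in zip(thresholds, labels):
--         if bpm < t:
--             return label
--     return "<TEMPO_200>"
-- ===== SOURCE B (Python) =====
-- import bisect
--
-- def quantize_tempo(bpm):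
--     thresholds = [70, 90, 110, 130, 150, 170, 190]
--     labels     = ["<TEMPO_60>","<TEMPO_80>","<TEMPO_100>","<TEMPO_120>",
--                   "<TEMPO_140>","<TEMPO_160>","<TEMPO_180>","<TEMPO_200>"]
--     return labels[bisect.bisect_right(thresholds, bpm)]
-- ===== Notes on version B (the rewrite author's own statement) =====
-- stated objective: idiomatic
-- what changed: Replaces the explicit linear scan with early return by a bisect_right binary search into the sorted thresholds, indexing the labels table directly (the fall-through case becomes index 7).
import Mathlib
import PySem

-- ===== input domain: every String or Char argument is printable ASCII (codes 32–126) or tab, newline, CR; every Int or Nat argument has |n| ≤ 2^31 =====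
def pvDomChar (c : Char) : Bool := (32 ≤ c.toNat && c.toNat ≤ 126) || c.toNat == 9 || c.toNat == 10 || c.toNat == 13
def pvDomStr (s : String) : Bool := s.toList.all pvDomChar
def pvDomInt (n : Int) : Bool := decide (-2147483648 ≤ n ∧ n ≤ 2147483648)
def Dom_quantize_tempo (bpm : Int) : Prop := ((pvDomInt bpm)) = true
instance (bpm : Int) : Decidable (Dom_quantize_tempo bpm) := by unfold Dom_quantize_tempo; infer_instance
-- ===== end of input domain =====

-- ===== PORT A =====
-- B replaces A's linear scan/early-return by a bisect_right (count of thresholds ≤ bpm) table lookup; same values, idiomatic.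
def quantize_tempo_loop (bpm : Int) : List (Int × String) → String
  | [] => "<TEMPO_200>"
  | (t, label) :: rest => if bpm < t then label else quantize_tempo_loop bpm rest

def quantize_tempo (bpm : Int) : String :=
  let thresholds : List Int := [70, 90, 110, 130, 150, 170, 190]
  let labels : List String := ["<TEMPO_60>","<TEMPO_80>","<TEMPO_100>","<TEMPO_120>",
                               "<TEMPO_140>","<TEMPO_160>","<TEMPO_180>","<TEMPO_200>"]
  quantize_tempo_loop bpm (thresholds.zip labels)

-- ===== PORT B =====
-- bisect.bisect_right on a sorted list = number of elements ≤ bpm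
def quantize_tempo_alt (bpm : Int) : String :=
  let thresholds : List Int := [70, 90, 110, 130, 150, 170, 190]
  let labels : List String := ["<TEMPO_60>","<TEMPO_80>","<TEMPO_100>","<TEMPO_120>",
                               "<TEMPO_140>","<TEMPO_160>","<TEMPO_180>","<TEMPO_200>"]
  labels.getD (thresholds.countP (fun t => t ≤ bpm)) ""

-- ===== PRECONDITION & SPEC =====
def Spec_quantize_tempo (bpm : Int) (out : String) : Prop := out = quantize_tempo_alt bpm
instance (bpm : Int) (out : String) : Decidable (Spec_quantize_tempo bpm out) := by unfold Spec_quantize_tempo; infer_instance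

-- ===== CLAIM (what is proved, stated in full; the proofs are below) =====
def Claim_equal_quantize_tempo : Prop := ∀ (bpm : Int), Dom_quantize_tempo bpm → Spec_quantize_tempo bpm (quantize_tempo bpm)

-- ===== LEMMAS AND PROOFS =====

-- ===== VERDICT (by name: the statement is the Claim_ definition above) =====
theorem quantize_tempo_spec : Claim_equal_quantize_tempo := by
  intro bpm _
  unfold Spec_quantize_tempo quantize_tempo quantize_tempo_alt
  simp only [List.zip, List.zipWith, List.countP, List.countP.go, quantize_tempo_loop]
  by_cases h1 : bpm < 70
  · simp [(show ¬((70:Int) ≤ bpm) by omega), (show bpm < 70 by omega), (show ¬((90:Int) ≤ bpm) by omega), (show bpm < 90 by omega), (show ¬((110:Int) ≤ bpm) by omega), (show bpm < 110 by omega), (show ¬((130:Int) ≤ bpm) by omega), (show bpm < 130 by omega), (show ¬((150:Int) ≤ bpm) by omega), (show bpm < 150 by omega), (show ¬((170:Int) ≤ bpm) by omega), (show bpm < 170 by omega), (show ¬((190:Int) ≤ bpm) by omega), (show bpm < 190 by omega)]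
  · by_cases h2 : bpm < 90
    · simp [(show (70:Int) ≤ bpm by omega), (show ¬(bpm < 70) by omega), (show ¬((90:Int) ≤ bpm) by omega), (show bpm < 90 by omega), (show ¬((110:Int) ≤ bpm) by omega), (show bpm < 110 by omega), (show ¬((130:Int) ≤ bpm) by omega), (show bpm < 130 by omega), (show ¬((150:Int) ≤ bpm) by omega), (show bpm < 150 by omega), (show ¬((170:Int) ≤ bpm) by omega), (show bpm < 170 by omega), (show ¬((190:Int) ≤ bpm) by omega), (show bpm < 190 by omega)]
    · by_cases h3 : bpm < 110
      · simp [(show (70:Int) ≤ bpm by omega), (show ¬(bpm < 70) by omega), (show (90:Int) ≤ bpm by omega), (show ¬(bpm < 90) by omega), (show ¬((110:Int) ≤ bpm) by omega), (show bpm < 110 by omega), (show ¬((130:Int) ≤ bpm) by omega), (show bpm < 130 by omega), (show ¬((150:Int) ≤ bpm) by omega), (show bpm < 150 by omega), (show ¬((170:Int) ≤ bpm) by omega), (show bpm < 170 by omega), (show ¬((190:Int) ≤ bpm) by omega), (show bpm < 190 by omega)]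
      · by_cases h4 : bpm < 130
        · simp [(show (70:Int) ≤ bpm by omega), (show ¬(bpm < 70) by omega), (show (90:Int) ≤ bpm by omega), (show ¬(bpm < 90) by omega), (show (110:Int) ≤ bpm by omega), (show ¬(bpm < 110) by omega), (show ¬((130:Int) ≤ bpm) by omega), (show bpm < 130 by omega), (show ¬((150:Int) ≤ bpm) by omega), (show bpm < 150 by omega), (show ¬((170:Int) ≤ bpm) by omega), (show bpm < 170 by omega), (show ¬((190:Int) ≤ bpm) by omega), (show bpm < 190 by omega)]
        · by_cases h5 : bpm < 150
          · simp [(show (70:Int) ≤ bpm by omega), (show ¬(bpm < 70) by omega), (show (90:Int) ≤ bpm by omega), (show ¬(bpm < 90) by omega), (show (110:Int) ≤ bpm by omega), (show ¬(bpm < 110) by omega), (show (130:Int) ≤ bpm by omega), (show ¬(bpm < 130) by omega), (show ¬((150:Int) ≤ bpm) by omega), (show bpm < 150 by omega), (show ¬((170:Int) ≤ bpm) by omega), (show bpm < 170 by omega), (show ¬((190:Int) ≤ bpm) by omega), (show bpm < 190 by omega)]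
          · by_cases h6 : bpm < 170
            · simp [(show (70:Int) ≤ bpm by omega), (show ¬(bpm < 70) by omega), (show (90:Int) ≤ bpm by omega), (show ¬(bpm < 90) by omega), (show (110:Int) ≤ bpm by omega), (show ¬(bpm < 110) by omega), (show (130:Int) ≤ bpm by omega), (show ¬(bpm < 130) by omega), (show (150:Int) ≤ bpm by omega), (show ¬(bpm < 150) by omega), (show ¬((170:Int) ≤ bpm) by omega), (show bpm < 170 by omega), (show ¬((190:Int) ≤ bpm) by omega), (show bpm < 190 by omega)]
            · by_cases h7 : bpm < 190
              · simp [(show (70:Int) ≤ bpm by omega), (show ¬(bpm < 70) by omega), (show (90:Int) ≤ bpm by omega), (show ¬(bpm < 90) by omega), (show (110:Int) ≤ bpm by omega), (show ¬(bpm < 110) by omega), (show (130:Int) ≤ bpm by omega), (show ¬(bpm < 130) by omega), (show (150:Int) ≤ bpm by omega), (show ¬(bpm < 150) by omega), (show (170:Int) ≤ bpm by omega), (show ¬(bpm < 170) by omega), (show ¬((190:Int) ≤ bpm) by omega), (show bpm < 190 by omega)]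
              · simp [(show (70:Int) ≤ bpm by omega), (show ¬(bpm < 70) by omega), (show (90:Int) ≤ bpm by omega), (show ¬(bpm < 90) by omega), (show (110:Int) ≤ bpm by omega), (show ¬(bpm < 110) by omega), (show (130:Int) ≤ bpm by omega), (show ¬(bpm < 130) by omega), (show (150:Int) ≤ bpm by omega), (show ¬(bpm < 150) by omega), (show (170:Int) ≤ bpm by omega), (show ¬(bpm < 170) by omega), (show (190:Int) ≤ bpm by omega), (show ¬(bpm < 190) by omega)]
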